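-- pv_equiv track=rewrite | github.com/Krivoy05/PytonForEverbody | dictionares/return_minimum_value_from_dictionary.py | find_max_value_from_dicionary_items
-- ===== SOURCE A (Python) =====
-- def find_max_value_from_dicionary_items(di):
--     result = None
--     for key,value in di.items():
--         if result == None:
--             result = key
--             counter = value
--         elif counter > value:
--             result = key
--             counter = value
--     return result
-- ===== SOURCE B (Python) =====
-- def find_max_value_from_dicionary_items(di):
--     ordered = sorted(di.items(), key=lambda kv: kv[1])
--     return ordered[0][0] if ordered else None
-- ===== Notes on version B (the rewrite author's own statement) =====
-- stated objective: alternative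
-- what changed: Replaces the single-pass running-minimum accumulator loop with a staged computation: stable-sort the items by value and take the first key (stability preserves A's first-wins tie-breaking).
import Mathlib
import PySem

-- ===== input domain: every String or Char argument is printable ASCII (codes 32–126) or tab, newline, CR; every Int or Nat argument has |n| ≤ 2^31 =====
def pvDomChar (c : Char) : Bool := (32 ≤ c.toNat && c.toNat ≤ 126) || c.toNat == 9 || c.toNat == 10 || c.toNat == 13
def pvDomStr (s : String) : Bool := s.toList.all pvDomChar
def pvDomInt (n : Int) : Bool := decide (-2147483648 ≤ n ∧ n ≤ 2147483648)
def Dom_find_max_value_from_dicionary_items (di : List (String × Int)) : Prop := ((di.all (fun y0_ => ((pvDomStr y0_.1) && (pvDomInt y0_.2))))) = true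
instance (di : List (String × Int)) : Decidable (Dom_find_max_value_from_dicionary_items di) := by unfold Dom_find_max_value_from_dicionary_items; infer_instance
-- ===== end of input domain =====

-- B replaces A's single-pass running-minimum accumulator loop with a staged computation:
-- stable-sort the items by value and take the first key (stability keeps A's first-wins ties).


-- ===== PORT A =====
-- state = (result, counter); counter is only read after result is set, the initial 0 is never read
def find_max_value_from_dicionary_items (di : List (String × Int)) : Option String :=
  (di.foldl (fun (st : Option String × Int) kv =>
      match st with
      | (none, _) => (some kv.1, kv.2)
      | (some r, counter) => if counter > kv.2 then (some kv.1, kv.2) else (some r, counter))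
    (none, 0)).1

-- ===== PORT B =====
def find_max_value_from_dicionary_items_alt (di : List (String × Int)) : Option String :=
  match PySem.List.sorted di (fun kv => kv.2) with
  | [] => none
  | kv :: _ => some kv.1

-- ===== PRECONDITION & SPEC =====
def Spec_find_max_value_from_dicionary_items (di : List (String × Int)) (out : Option String) : Prop := out = find_max_value_from_dicionary_items_alt di
instance (di : List (String × Int)) (out : Option String) : Decidable (Spec_find_max_value_from_dicionary_items di out) := by unfold Spec_find_max_value_from_dicionary_items; infer_instance

-- ===== CLAIM (what is proved, stated in full; the proofs are below) =====
def Claim_equal_find_max_value_from_dicionary_items : Prop := ∀ (di : List (String × Int)), Dom_find_max_value_from_dicionary_items di → Spec_find_max_value_from_dicionary_items di (find_max_value_from_dicionary_items di)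

-- ===== LEMMAS AND PROOFS =====

-- first-minimum selection step shared by both characterisations
def pvMinStep (m kv : String × Int) : String × Int := if kv.2 < m.2 then kv else m

-- the head of the insertion-sort accumulator evolves exactly by pvMinStep
theorem pv_head_foldl_insertBy (t : List (String × Int)) :
    ∀ (h : String × Int) (rest : List (String × Int)),
    (t.foldl (fun acc x => PySem.List.insertBy (fun a b => decide (a.2 < b.2)) x acc) (h :: rest)).head?
      = some (t.foldl pvMinStep h) := by
  induction t with
  | nil => intro h rest; rfl
  | cons x t ih =>
    intro h rest
    simp only [List.foldl_cons, PySem.List.insertBy, pvMinStep]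
    by_cases hx : x.2 < h.2
    · simp only [hx, decide_true, if_pos]
      exact ih x (h :: rest)
    · simp only [hx, decide_false, Bool.false_eq_true, if_neg, not_false_iff]
      exact ih h _

-- A's loop from a set accumulator computes the same pvMinStep fold
theorem pv_loopA_eq_minFold (t : List (String × Int)) :
    ∀ (r : String) (c : Int),
    (t.foldl (fun (st : Option String × Int) kv =>
      match st with
      | (none, _) => (some kv.1, kv.2)
      | (some r, counter) => if counter > kv.2 then (some kv.1, kv.2) else (some r, counter))
      (some r, c)).1
      = some (t.foldl pvMinStep (r, c)).1 := by
  induction t with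
  | nil => intro r c; rfl
  | cons kv t ih =>
    intro r c
    simp only [List.foldl_cons, pvMinStep]
    by_cases h : kv.2 < c
    · simp only [if_pos h, gt_iff_lt]
      exact ih kv.1 kv.2
    · simp only [if_neg h, gt_iff_lt]
      exact ih r c

-- ===== VERDICT (by name: the statement is the Claim_ definition above) =====
theorem find_max_value_from_dicionary_items_spec : Claim_equal_find_max_value_from_dicionary_items := by
  intro di _
  unfold Spec_find_max_value_from_dicionary_items
  cases di with
  | nil => rfl
  | cons kv t =>
    obtain ⟨k, v⟩ := kv
    have hsorted :
        (PySem.List.sorted ((k, v) :: t) (fun kv => kv.2)).head? = some (t.foldl pvMinStep (k, v)) := by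
      rw [PySem.List.sorted_eq_foldl_insertBy]
      simpa using pv_head_foldl_insertBy t (k, v) []
    unfold find_max_value_from_dicionary_items find_max_value_from_dicionary_items_alt
    rcases hs : PySem.List.sorted ((k, v) :: t) (fun kv => kv.2) with _ | ⟨m, rest⟩
    · rw [hs] at hsorted; cases hsorted
    · rw [hs] at hsorted
      simp only [List.head?_cons, Option.some.injEq] at hsorted
      simp only [List.foldl_cons]
      rw [pv_loopA_eq_minFold t k v, hsorted]
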